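-- pv_equiv track=rewrite | github.com/raeez/chiral-bar-cobar | compute/lib/spectral_zeta_bar.py | bar_h1_ce_virasoro
-- ===== SOURCE A (Python) =====
-- from typing import Dict, List, Optional, Tuple, Union
--
-- def bar_h1_ce_virasoro(max_weight: int = 20) -> Dict[int, int]:
--     r"""Bar cohomology H^1(B(Vir))_h via Chevalley-Eilenberg cohomology
--     of Vir_- = span{L_{-n} : n >= 2}.
--
--     The CE complex Lambda^k(Vir_-^*) has:
--     - Lambda^0 = k (ground field, weight 0)
--     - Lambda^1 has basis {L_{-h}^*} at each weight h >= 2 (dim = 1)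
--     - Lambda^2 at weight h has basis {L_{-a}^* ^ L_{-b}^*} with a+b=h, 2<=a<b
--     - d: Lambda^1 -> Lambda^2 is dual to the bracket [L_{-a}, L_{-b}] = (b-a)L_{-(a+b)}
--
--     The map d: Lambda^1_h -> Lambda^2_h sends L_{-h}^* to
--     sum_{a+b=h, a<b} (b-a) * L_{-a}^* ^ L_{-b}^*.
--
--     H^1_h = ker(d: Lambda^1_h -> Lambda^2_h) / im(d: Lambda^0_h -> Lambda^1_h)
--     Since Lambda^0_h = 0 for h >= 1, H^1_h = ker(d_h).
--
--     The map d_h: k -> Lambda^2_h is: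
--     L_{-h}^* |-> sum_{2<=a<b, a+b=h} (b-a) L_{-a}^* ^ L_{-b}^*
--
--     This is zero iff there are NO pairs (a,b) with 2<=a<b and a+b=h.
--     Pairs exist when h >= 5 (since a >= 2, b >= 3, a+b >= 5).
--     At h=2: a=2, b must be 0 < 2. No pairs. d_2 = 0. H^1_2 = 1.
--     At h=3: a=2, b=1 < 2. No valid pairs. d_3 = 0. H^1_3 = 1.
--     At h=4: a=2, b=2. But need a < b. No valid pairs. d_4 = 0. H^1_4 = 1.
--     At h=5: a=2, b=3. Valid pair (2 < 3, 2+3=5). d_5(L_{-5}^*) = L_{-2}^* ^ L_{-3}^* != 0.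
--     So H^1_5 = 0.
--     For h >= 5: always exists a valid pair, so d_h != 0, hence H^1_h = 0.
--
--     Result: H^1(B(Vir)) = {weight 2: 1, weight 3: 1, weight 4: 1}
--     Total: 3 generators of the Koszul dual A!.
--     """
--     result = {}
--     for h in range(2, max_weight + 1):
--         # Count valid pairs (a,b) with 2 <= a < b and a+b = h
--         num_pairs = sum(1 for a in range(2, h // 2 + 1)
--                         if h - a > a and h - a >= 2)
--         # H^1_h = 1 if no valid pairs (d_h = 0), else 0
--         if num_pairs == 0:
--             result[h] = 1
--         else:
--             result[h] = 0
--     return result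
-- ===== SOURCE B (Python) =====
-- def bar_h1_ce_virasoro(max_weight: int = 20):
--     # Closed form: H^1_h = 1 exactly for h in {2,3,4} (no pair 2<=a<b with a+b=h), else 0.
--     return {h: (1 if h <= 4 else 0) for h in range(2, max_weight + 1)}
-- ===== Notes on version B (the rewrite author's own statement) =====
-- stated objective: faster
-- what changed: Replaced the per-weight inner pair-counting loop by the closed form 1 if h <= 4 else 0, derived from the fact that a pair 2<=a<b with a+b=h exists exactly when h>=5.
import Mathlib
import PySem

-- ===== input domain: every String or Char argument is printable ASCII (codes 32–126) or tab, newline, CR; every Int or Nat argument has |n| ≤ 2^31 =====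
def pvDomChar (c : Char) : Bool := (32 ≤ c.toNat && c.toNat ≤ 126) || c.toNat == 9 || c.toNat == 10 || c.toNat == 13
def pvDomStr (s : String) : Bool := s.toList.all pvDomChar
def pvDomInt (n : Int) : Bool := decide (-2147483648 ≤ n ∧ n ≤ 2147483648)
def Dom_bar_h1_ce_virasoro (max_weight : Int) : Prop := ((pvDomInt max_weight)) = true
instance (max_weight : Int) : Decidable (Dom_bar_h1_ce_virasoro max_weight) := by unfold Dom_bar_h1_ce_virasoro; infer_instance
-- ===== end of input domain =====

-- ===== PORT A =====
-- Literal transliteration of A: for each h in range(2, max_weight+1) count pairs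
-- (a, h-a) with 2 <= a < h-a by an inner loop, then insert 1 or 0 into the dict.
def bar_h1_ce_virasoro (max_weight : Int) : List (Int × Int) :=
  ((PySem.List.pyRange 2 (max_weight + 1) 1).foldl (fun result h =>
      let num_pairs : Int :=
        (PySem.List.pyRange 2 (PySem.Int.floordiv h 2 + 1) 1).foldl
          (fun acc a => if h - a > a ∧ h - a ≥ 2 then acc + 1 else acc) 0
      if num_pairs = 0 then result.insert h 1 else result.insert h 0)
    PySem.Dict.empty).items

-- ===== PORT B =====
-- B: closed form, one pass.
def bar_h1_ce_virasoro_alt (max_weight : Int) : List (Int × Int) :=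
  (PySem.List.pyRange 2 (max_weight + 1) 1).map (fun h => (h, if h ≤ 4 then 1 else 0))

-- ===== PRECONDITION & SPEC =====
def Spec_bar_h1_ce_virasoro (max_weight : Int) (out : List (Int × Int)) : Prop := out = bar_h1_ce_virasoro_alt max_weight
instance (max_weight : Int) (out : List (Int × Int)) : Decidable (Spec_bar_h1_ce_virasoro max_weight out) := by unfold Spec_bar_h1_ce_virasoro; infer_instance

-- ===== CLAIM (what is proved, stated in full; the proofs are below) =====
def Claim_equal_bar_h1_ce_virasoro : Prop := ∀ (max_weight : Int), Dom_bar_h1_ce_virasoro max_weight → Spec_bar_h1_ce_virasoro max_weight (bar_h1_ce_virasoro max_weight)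

-- ===== LEMMAS AND PROOFS =====

-- num_pairs is 0 iff h ≤ 4, for h ≥ 2
theorem pv_numpairs (h : Int) (hh : 2 ≤ h) :
    (PySem.List.pyRange 2 (PySem.Int.floordiv h 2 + 1) 1).foldl
      (fun acc a => if h - a > a ∧ h - a ≥ 2 then acc + 1 else acc) (0 : Int)
    = (if h ≤ 4 then 0 else 1 + ((PySem.List.pyRange 3 (PySem.Int.floordiv h 2 + 1) 1).countP
        (fun a => decide (h - a > a ∧ h - a ≥ 2)) : Int)) := by
  rw [PySem.List.foldl_ite_add_one]
  rw [PySem.Int.floordiv_eq_ediv_of_pos (by norm_num)]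
  by_cases h4 : h ≤ 4
  · simp only [h4, if_true, zero_add]
    rw [List.countP_eq_zero.mpr]
    · rfl
    intro a ha
    rw [PySem.List.mem_pyRange_one] at ha
    simp only [decide_eq_true_eq, not_and, not_le]
    intro hab
    omega
  · simp only [h4, if_false, zero_add]
    rw [PySem.List.pyRange_one_cons (by omega), List.countP_cons]
    have : decide (h - 2 > 2 ∧ h - 2 ≥ 2) = true := by
      simp only [decide_eq_true_eq]; omega
    rw [this]
    simp
    omega

-- the step value of A as a single insert
theorem pv_A_items (mw : Int) :
    bar_h1_ce_virasoro mw
    = (PySem.List.pyRange 2 (mw + 1) 1).map (fun h =>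
        (h, if ((PySem.List.pyRange 2 (PySem.Int.floordiv h 2 + 1) 1).foldl
              (fun acc a => if h - a > a ∧ h - a ≥ 2 then acc + 1 else acc) (0 : Int)) = 0
            then (1 : Int) else 0)) := by
  unfold bar_h1_ce_virasoro
  have hfun : ∀ (d : PySem.Dict Int Int) (h : Int),
      (let num_pairs : Int :=
        (PySem.List.pyRange 2 (PySem.Int.floordiv h 2 + 1) 1).foldl
          (fun acc a => if h - a > a ∧ h - a ≥ 2 then acc + 1 else acc) 0
       if num_pairs = 0 then d.insert h 1 else d.insert h 0)
      = d.insert h (if ((PySem.List.pyRange 2 (PySem.Int.floordiv h 2 + 1) 1).foldl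
              (fun acc a => if h - a > a ∧ h - a ≥ 2 then acc + 1 else acc) (0 : Int)) = 0
            then (1 : Int) else 0) := by
    intro d h
    simp only []
    split_ifs <;> rfl
  rw [show (fun (result : PySem.Dict Int Int) (h : Int) =>
      let num_pairs : Int :=
        (PySem.List.pyRange 2 (PySem.Int.floordiv h 2 + 1) 1).foldl
          (fun acc a => if h - a > a ∧ h - a ≥ 2 then acc + 1 else acc) 0
      if num_pairs = 0 then result.insert h 1 else result.insert h 0)
    = (fun (result : PySem.Dict Int Int) (h : Int) =>
        result.insert ((fun (x : Int) => x) h) ((fun h => if ((PySem.List.pyRange 2 (PySem.Int.floordiv h 2 + 1) 1).foldl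
              (fun acc a => if h - a > a ∧ h - a ≥ 2 then acc + 1 else acc) (0 : Int)) = 0
            then (1 : Int) else 0) h)) from funext fun d => funext fun h => hfun d h]
  rw [PySem.Dict.items_foldl_insert_fresh]
  · rfl
  · intro a _; exact PySem.Dict.contains_empty a
  · simpa using PySem.List.nodup_pyRange_one 2 (mw + 1)

-- ===== VERDICT (by name: the statement is the Claim_ definition above) =====
theorem bar_h1_ce_virasoro_spec : Claim_equal_bar_h1_ce_virasoro := by
  intro mw _
  unfold Spec_bar_h1_ce_virasoro bar_h1_ce_virasoro_alt
  rw [pv_A_items]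
  apply List.map_congr_left
  intro h hm
  rw [PySem.List.mem_pyRange_one] at hm
  rw [pv_numpairs h hm.1]
  by_cases h4 : h ≤ 4
  · simp [h4]
  · simp only [h4, if_false]
    rw [if_neg (by omega)]
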